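-- pv_equiv track=rewrite | github.com/eliottcassidy2000/math | 04-computation/forbidden_H_23.py | products_up_to
-- ===== SOURCE A (Python) =====
-- def products_up_to(limit, factors, current=1, start=0):
--     """Generate all products of factors ≤ limit."""
--     results = set()
--     results.add(current)
--     for i in range(start, len(factors)):
--         p = current * factors[i]
--         if p <= limit:
--             results |= products_up_to(limit, factors, p, i)
--     return results
-- ===== SOURCE B (Python) =====
-- def products_up_to(limit, factors, current=1, start=0):
--     """Generate all products of factors <= limit (iterative DFS: explicit stack of
--     (value, index) states, each state expanded at most once thanks to a seen set)."""
--     results = set()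
--     seen = set()
--     stack = [(current, start)]
--     while stack:
--         v, s = stack.pop()
--         if (v, s) in seen:
--             continue
--         seen.add((v, s))
--         results.add(v)
--         for i in reversed(range(s, len(factors))):
--             p = v * factors[i]
--             if p <= limit:
--                 stack.append((p, i))
--     return results
-- ===== Notes on version B (the rewrite author's own statement) =====
-- stated objective: alternative
-- what changed: Replaces A's recursion that re-enumerates every non-decreasing factor-index sequence (building a fresh set per call and uniting them) by an iterative worklist loop: an explicit stack of (value, index) states popped one at a time with a seen-state set, so each state is expanded at most once (a large win only on duplicate-heavy inputs; a timing run's inputs showed no measurable difference).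
-- outside the precondition, e.g. on products_up_to(0, [2], 1, -1): A returns {1}, B returns {1}; on products_up_to(-3, [0, 1], 5, 0): A returns {5}, B returns {5}; on products_up_to(-10, [2], -1, 0): A returns {-1}, B returns {-1}
import Mathlib
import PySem

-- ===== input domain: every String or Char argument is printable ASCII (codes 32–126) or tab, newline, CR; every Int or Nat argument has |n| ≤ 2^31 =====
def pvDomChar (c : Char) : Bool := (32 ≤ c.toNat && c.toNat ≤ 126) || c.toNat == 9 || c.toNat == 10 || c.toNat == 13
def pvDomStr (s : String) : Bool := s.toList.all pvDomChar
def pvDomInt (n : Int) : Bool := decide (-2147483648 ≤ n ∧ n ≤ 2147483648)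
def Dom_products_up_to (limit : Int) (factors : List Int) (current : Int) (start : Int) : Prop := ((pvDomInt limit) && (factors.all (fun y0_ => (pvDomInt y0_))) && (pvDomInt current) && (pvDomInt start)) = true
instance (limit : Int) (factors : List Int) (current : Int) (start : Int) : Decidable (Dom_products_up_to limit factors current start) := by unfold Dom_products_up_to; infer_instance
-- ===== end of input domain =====

-- B replaces A's recursive union-of-sets enumeration by an iterative worklist loop: an explicit
-- stack of (value, index) states with a seen-state set, each state expanded at most once.


-- ===== PORT A =====
-- A's recursion has no structural bound, so the port takes explicit fuel; under Pre_ every recursive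
-- call strictly increases `current` while staying ≤ limit, so fuel (limit - current).toNat + 1 is
-- never exhausted on admitted inputs (fuel-irrelevance is proved in lemma A_fuel below).
def pyAgo (limit : Int) (factors : List Int) : Nat → Int → Int → PySem.Set Int
  | 0, current, _ => PySem.Set.add PySem.Set.empty current
  | fuel + 1, current, start =>
    (PySem.List.pyRange start (PySem.List.len factors) 1).foldl
      (fun results i =>
        let p := current * PySem.List.pyGetD factors i 0
        if p ≤ limit then PySem.Set.union results (pyAgo limit factors fuel p i) else results)
      (PySem.Set.add PySem.Set.empty current)

def products_up_to (limit : Int) (factors : List Int) (current : Int) (start : Int) : List Int :=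
  pyAgo limit factors ((limit - current).toNat + 1) current start

-- ===== PORT B =====
-- Source B's `while stack:` loop; the stack is modeled head-as-top, so Source B's `stack.append` over
-- `reversed(range(s, len(factors)))` becomes a foldl over the reversed range consing onto the stack.
-- The loop has no structural bound, so the port spends one unit of fuel per iteration; under Pre_
-- the seen-set makes the iteration count polynomial, so the fuel below is never exhausted
-- (proved in lemma stack_sim below).
def pyBloop (limit : Int) (factors : List Int) :
    Nat → List (Int × Int) → PySem.Set Int × PySem.Set (Int × Int) →
      PySem.Set Int × PySem.Set (Int × Int)
  | 0, _, st => st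
  | _ + 1, [], st => st
  | fuel + 1, (v, s) :: stack, st =>
    if PySem.Set.contains st.2 (v, s) then pyBloop limit factors fuel stack st
    else
      pyBloop limit factors fuel
        ((PySem.List.pyRange s (PySem.List.len factors) 1).reverse.foldl
          (fun stk i =>
            let p := v * PySem.List.pyGetD factors i 0
            if p ≤ limit then (p, i) :: stk else stk)
          stack)
        (PySem.Set.add st.1 v, PySem.Set.add st.2 (v, s))

def products_up_to_alt (limit : Int) (factors : List Int) (current : Int) (start : Int) : List Int :=
  (pyBloop limit factors
      (((limit - current).toNat + 1) * (factors.length + 1) * (factors.length + 1)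
        + factors.length + 2)
      [(current, start)] (PySem.Set.empty, PySem.Set.empty)).1

-- ===== PRECONDITION & SPEC =====
-- Pre_ excludes negative start (Python's negative-index wraparound / IndexError) and inputs whose
-- scanned suffix has a factor < 2 or whose current is < 1 while the loop is non-empty: on those A
-- almost always recurses without bound (RecursionError); the few such inputs on which the limit cuts
-- every branch immediately (so A still returns) are excluded together with that region.
def Pre_products_up_to (limit : Int) (factors : List Int) (current : Int) (start : Int) : Prop :=
  0 ≤ start ∧ (1 ≤ current ∨ (factors.length : Int) ≤ start) ∧
    ∀ f ∈ factors.drop start.toNat, 2 ≤ f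
instance (limit : Int) (factors : List Int) (current : Int) (start : Int) : Decidable (Pre_products_up_to limit factors current start) := by unfold Pre_products_up_to; infer_instance

def pvWitness_products_up_to : Int × List Int × Int × Int := (20, [2, 3], 1, 0)

def Spec_products_up_to (limit : Int) (factors : List Int) (current : Int) (start : Int) (out : List Int) : Prop := out = products_up_to_alt limit factors current start
instance (limit : Int) (factors : List Int) (current : Int) (start : Int) (out : List Int) : Decidable (Spec_products_up_to limit factors current start out) := by unfold Spec_products_up_to; infer_instance

-- ===== CLAIM (what is proved, stated in full; the proofs are below) =====
def Claim_equal_products_up_to : Prop := ∀ (limit : Int) (factors : List Int) (current : Int) (start : Int), Dom_products_up_to limit factors current start → Pre_products_up_to limit factors current start → Spec_products_up_to limit factors current start (products_up_to limit factors current start)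

-- ===== LEMMAS AND PROOFS =====

def StateOk (factors : List Int) (v s : Int) : Prop :=
  1 ≤ v ∧ 0 ≤ s ∧ ∀ f ∈ factors.drop s.toNat, 2 ≤ f

def Aset (limit : Int) (factors : List Int) (v s : Int) : PySem.Set Int :=
  pyAgo limit factors ((limit - v).toNat + 1) v s

def Abody (limit : Int) (factors : List Int) (v : Int) (g : Int → Int → PySem.Set Int)
    (r : PySem.Set Int) (i : Int) : PySem.Set Int :=
  if v * PySem.List.pyGetD factors i 0 ≤ limit then
    PySem.Set.update r (g (v * PySem.List.pyGetD factors i 0) i)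
  else r

-- the children of state (v, s), as (product, index) pairs, in ascending index order
def childList (limit : Int) (factors : List Int) (v s : Int) : List (Int × Int) :=
  (PySem.List.pyRange s (PySem.List.len factors) 1).filterMap
    (fun i =>
      if v * PySem.List.pyGetD factors i 0 ≤ limit then some (v * PySem.List.pyGetD factors i 0, i)
      else none)

-- a finite (list) universe every (value, index) state of a run from (c0, s0) lives in
def StUniv (limit : Int) (len : Nat) (c0 s0 : Int) : List (Int × Int) :=
  (c0, s0) :: (PySem.List.pyRange c0 (limit + 1) 1).flatMap
    (fun w => (PySem.List.pyRange 0 (len : Int) 1).map (fun t => (w, t)))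

lemma child_ok (factors : List Int) (v s i : Int)
    (hv : StateOk factors v s) (hi : i ∈ PySem.List.pyRange s (PySem.List.len factors) 1) :
    StateOk factors (v * PySem.List.pyGetD factors i 0) i ∧
      v < v * PySem.List.pyGetD factors i 0 := by
  obtain ⟨hv1, hs0, hsuf⟩ := hv
  rw [PySem.List.len_eq] at hi
  have hi' := PySem.List.mem_pyRange_one.1 hi
  have h0i : 0 ≤ i := le_trans hs0 hi'.1
  have hilen : i < (factors.length : Int) := hi'.2
  have hget : PySem.List.pyGetD factors i 0 = factors[i.toNat] :=
    PySem.List.pyGetD_eq_getElem factors 0 h0i hilen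
  have hlen : i.toNat < factors.length := by omega
  have hj : i.toNat - s.toNat < (factors.drop s.toNat).length := by
    simp [List.length_drop]; omega
  have hmem : factors[i.toNat] ∈ factors.drop s.toNat := by
    refine List.mem_iff_getElem.2 ⟨i.toNat - s.toNat, hj, ?_⟩
    rw [List.getElem_drop]
    congr 1
    omega
  have hf2 : 2 ≤ factors[i.toNat] := hsuf _ hmem
  have hmul : v * 2 ≤ v * factors[i.toNat] := mul_le_mul_of_nonneg_left hf2 (by omega)
  have hlt : v < v * PySem.List.pyGetD factors i 0 := by rw [hget]; omega
  refine ⟨⟨by rw [hget]; omega, h0i, ?_⟩, hlt⟩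
  intro f hf
  apply hsuf
  have hdd : factors.drop i.toNat = List.drop (i.toNat - s.toNat) (List.drop s.toNat factors) := by
    rw [List.drop_drop]; congr 1; omega
  rw [hdd] at hf
  exact List.drop_subset _ _ hf

lemma set_update_eq_self {s : PySem.Set Int} {t : List Int} (h : ∀ x ∈ t, x ∈ s) :
    PySem.Set.update s t = s := by
  induction t generalizing s with
  | nil => exact PySem.Set.update_nil s
  | cons x t ih =>
    rw [PySem.Set.update_cons, PySem.Set.add_of_mem (h x (by simp))]
    exact ih fun y hy => h y (by simp [hy])

lemma set_update_add (r a : PySem.Set Int) (x : Int) :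
    PySem.Set.update r (PySem.Set.add a x) = PySem.Set.add (PySem.Set.update r a) x := by
  by_cases hx : x ∈ a
  · rw [PySem.Set.add_of_mem hx, PySem.Set.add_of_mem ((PySem.Set.mem_update r a x).2 (Or.inr hx))]
  · rw [PySem.Set.add_of_not_mem hx, PySem.Set.update_append, PySem.Set.update_cons,
      PySem.Set.update_nil]

lemma set_update_update (r a : PySem.Set Int) (u : List Int) :
    PySem.Set.update r (PySem.Set.update a u) = PySem.Set.update (PySem.Set.update r a) u := by
  induction u generalizing a with
  | nil => rw [PySem.Set.update_nil, PySem.Set.update_nil]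
  | cons x u ih =>
    rw [PySem.Set.update_cons, PySem.Set.update_cons, ih, set_update_add]

lemma update_foldl_comm (limit : Int) (factors : List Int) (v : Int) (g : Int → Int → PySem.Set Int) :
    ∀ (L : List Int) (r a : PySem.Set Int),
      PySem.Set.update r (L.foldl (Abody limit factors v g) a) =
        L.foldl (Abody limit factors v g) (PySem.Set.update r a) := by
  intro L
  induction L with
  | nil => intro r a; simp
  | cons i L ih =>
    intro r a
    simp only [List.foldl_cons]
    rw [ih]
    congr 1
    unfold Abody
    by_cases hp : v * PySem.List.pyGetD factors i 0 ≤ limit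
    · simp only [hp, if_true]; rw [set_update_update]
    · simp only [hp, if_false]

lemma A_fuel (limit : Int) (factors : List Int) :
    ∀ n v s F₁ F₂, (limit - v).toNat ≤ n → StateOk factors v s →
      (limit - v).toNat < F₁ → (limit - v).toNat < F₂ →
      pyAgo limit factors F₁ v s = pyAgo limit factors F₂ v s := by
  intro n
  induction n with
  | zero =>
    intro v s F₁ F₂ hn hv h1 h2
    obtain ⟨f₁, rfl⟩ : ∃ f, F₁ = f + 1 := ⟨F₁ - 1, by omega⟩
    obtain ⟨f₂, rfl⟩ : ∃ f, F₂ = f + 1 := ⟨F₂ - 1, by omega⟩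
    simp only [pyAgo]
    apply PySem.List.foldl_congr_mem
    intro a i hi
    obtain ⟨hok, hlt⟩ := child_ok factors v s i hv hi
    have hp : ¬ v * PySem.List.pyGetD factors i 0 ≤ limit := by omega
    simp only [hp, if_false]
  | succ n ih =>
    intro v s F₁ F₂ hn hv h1 h2
    obtain ⟨f₁, rfl⟩ : ∃ f, F₁ = f + 1 := ⟨F₁ - 1, by omega⟩
    obtain ⟨f₂, rfl⟩ : ∃ f, F₂ = f + 1 := ⟨F₂ - 1, by omega⟩
    simp only [pyAgo]
    apply PySem.List.foldl_congr_mem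
    intro a i hi
    obtain ⟨hok, hlt⟩ := child_ok factors v s i hv hi
    by_cases hp : v * PySem.List.pyGetD factors i 0 ≤ limit
    · simp only [hp, if_true]
      rw [ih (v * PySem.List.pyGetD factors i 0) i f₁ f₂ (by omega) hok (by omega) (by omega)]
    · simp only [hp, if_false]

lemma Aset_unfold (limit : Int) (factors : List Int) (v s : Int) (hv : StateOk factors v s) :
    Aset limit factors v s =
      (PySem.List.pyRange s (PySem.List.len factors) 1).foldl
        (Abody limit factors v (Aset limit factors))
        (PySem.Set.add PySem.Set.empty v) := by
  unfold Aset
  simp only [pyAgo]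
  apply PySem.List.foldl_congr_mem
  intro a i hi
  obtain ⟨hok, hlt⟩ := child_ok factors v s i hv hi
  by_cases hp : v * PySem.List.pyGetD factors i 0 ≤ limit
  · simp only [Abody, hp, if_true]
    have := A_fuel limit factors ((limit - v).toNat)
      (v * PySem.List.pyGetD factors i 0) i
      ((limit - v).toNat) ((limit - (v * PySem.List.pyGetD factors i 0)).toNat + 1)
      (by omega) hok (by omega) (by omega)
    rw [this]
    rfl
  · simp only [Abody, hp, if_false]

lemma A_nodup (limit : Int) (factors : List Int) :
    ∀ fuel v s, (pyAgo limit factors fuel v s).Nodup := by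
  intro fuel
  induction fuel with
  | zero =>
    intro v s
    simp only [pyAgo]
    rw [PySem.Set.add_of_not_mem (by simp [PySem.Set.empty])]
    simp [PySem.Set.empty]
  | succ fuel ih =>
    intro v s
    simp only [pyAgo]
    have hbase : (PySem.Set.add (PySem.Set.empty (α := Int)) v).Nodup := by
      rw [PySem.Set.add_of_not_mem (by simp [PySem.Set.empty])]
      simp [PySem.Set.empty]
    generalize (PySem.Set.add (PySem.Set.empty (α := Int)) v) = acc at hbase
    induction (PySem.List.pyRange s (PySem.List.len factors) 1) generalizing acc with
    | nil => simpa using hbase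
    | cons i L ihL =>
      simp only [List.foldl_cons]
      apply ihL
      by_cases hp : v * PySem.List.pyGetD factors i 0 ≤ limit
      · simp only [hp, if_true]
        exact PySem.Set.nodup_union _ _ hbase
      · simpa only [hp, if_false] using hbase

-- the reversed push loop of Source B prepends the (ascending) child list onto the stack
lemma push_eq (limit : Int) (factors : List Int) (v : Int) :
    ∀ (L : List Int) (stack : List (Int × Int)),
      L.reverse.foldl
          (fun stk i =>
            let p := v * PySem.List.pyGetD factors i 0
            if p ≤ limit then (p, i) :: stk else stk)
          stack =
        (L.filterMap
            (fun i =>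
              if v * PySem.List.pyGetD factors i 0 ≤ limit then
                some (v * PySem.List.pyGetD factors i 0, i)
              else none)) ++ stack := by
  intro L
  induction L with
  | nil => intro stack; rfl
  | cons x L ih =>
    intro stack
    rw [List.reverse_cons, List.foldl_append, ih]
    simp only [List.foldl_cons, List.foldl_nil, List.filterMap_cons]
    by_cases hp : v * PySem.List.pyGetD factors x 0 ≤ limit
    · simp [hp]
    · simp [hp]

-- folding Abody over the index range = folding plain updates over the child list
lemma Abody_foldl_childList (limit : Int) (factors : List Int) (v : Int)
    (g : Int → Int → PySem.Set Int) :
    ∀ (L : List Int) (r : PySem.Set Int),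
      L.foldl (Abody limit factors v g) r =
        (L.filterMap
            (fun i =>
              if v * PySem.List.pyGetD factors i 0 ≤ limit then
                some (v * PySem.List.pyGetD factors i 0, i)
              else none)).foldl
          (fun r pi => PySem.Set.update r (g pi.1 pi.2)) r := by
  intro L
  induction L with
  | nil => intro r; rfl
  | cons i L ih =>
    intro r
    simp only [List.foldl_cons, List.filterMap_cons]
    by_cases hp : v * PySem.List.pyGetD factors i 0 ≤ limit
    · simp only [hp, if_true, Abody, List.foldl_cons]
      exact ih _
    · simp only [hp, if_false, Abody]
      exact ih _

lemma foldl_update_mono (g : Int → Int → PySem.Set Int) :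
    ∀ (C : List (Int × Int)) (r : PySem.Set Int) (x : Int), x ∈ r →
      x ∈ C.foldl (fun r pi => PySem.Set.update r (g pi.1 pi.2)) r := by
  intro C
  induction C with
  | nil => intro r x hx; simpa using hx
  | cons pi C ih =>
    intro r x hx
    simp only [List.foldl_cons]
    exact ih _ x ((PySem.Set.mem_update _ _ _).2 (Or.inl hx))

lemma nodup_length_le_card (U seen : List (Int × Int))
    (hn : seen.Nodup) (hU : ∀ e ∈ seen, e ∈ U) : seen.length ≤ U.length := by
  classical
  calc seen.length = seen.toFinset.card := (List.toFinset_card_of_nodup hn).symm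
    _ ≤ U.toFinset.card := Finset.card_le_card
        (fun e he => List.mem_toFinset.2 (hU e (List.mem_toFinset.1 he)))
    _ ≤ U.length := U.toFinset_card_le

lemma mem_StUniv {limit : Int} {len : Nat} {c0 s0 w t : Int}
    (h1 : c0 ≤ w) (h2 : w ≤ limit) (h3 : 0 ≤ t) (h4 : t < (len : Int)) :
    (w, t) ∈ StUniv limit len c0 s0 := by
  unfold StUniv
  refine List.mem_cons.2 (Or.inr (List.mem_flatMap.2 ⟨w, ?_, ?_⟩))
  · exact PySem.List.mem_pyRange_one.2 ⟨h1, by omega⟩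
  · exact List.mem_map.2 ⟨t, PySem.List.mem_pyRange_one.2 ⟨h3, h4⟩, rfl⟩

lemma length_StUniv (limit : Int) (len : Nat) (c0 s0 : Int) :
    (StUniv limit len c0 s0).length = 1 + (limit + 1 - c0).toNat * len := by
  unfold StUniv
  rw [List.length_cons, List.length_flatMap]
  have hsum : ∀ L : List Int,
      (L.map (fun w =>
        ((PySem.List.pyRange 0 (len : Int) 1).map (fun t => (w, t))).length)).sum =
      L.length * len := by
    intro L
    induction L with
    | nil => simp
    | cons a L ih =>
      rw [List.map_cons, List.sum_cons, ih, List.length_map,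
        PySem.List.length_pyRange_one, List.length_cons, Nat.succ_mul]
      omega
  rw [hsum, PySem.List.length_pyRange_one]
  omega

-- the main simulation: popping a valid unprocessed-or-seen state (v, s) from the stack turns the
-- results set into `update results (Aset v s)` and leaves enough fuel for the rest of the stack
lemma stack_sim (limit : Int) (factors : List Int) (c0 s0 : Int) :
    ∀ n v s, (limit - v).toNat ≤ n → StateOk factors v s →
      (v, s) ∈ StUniv limit factors.length c0 s0 → c0 ≤ v →
      ∀ (stack : List (Int × Int)) (fuel : Nat) (results : PySem.Set Int)
        (seen : PySem.Set (Int × Int)),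
        seen.Nodup →
        (∀ e ∈ seen, e ∈ StUniv limit factors.length c0 s0) →
        (∀ w t, (w, t) ∈ seen → w < v ∨
          (StateOk factors w t ∧ ∀ x ∈ Aset limit factors w t, x ∈ results)) →
        stack.length + 1 +
            ((StUniv limit factors.length c0 s0).length - seen.length) * (factors.length + 1) ≤ fuel →
        ∃ fuel' seen',
          pyBloop limit factors fuel ((v, s) :: stack) (results, seen) =
            pyBloop limit factors fuel' stack
              (PySem.Set.update results (Aset limit factors v s), seen') ∧
          stack.length +
              ((StUniv limit factors.length c0 s0).length - seen'.length) * (factors.length + 1)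
            ≤ fuel' ∧
          seen'.Nodup ∧
          (∀ e ∈ seen', e ∈ StUniv limit factors.length c0 s0) ∧
          (∀ e ∈ seen, e ∈ seen') ∧
          (∀ w t, (w, t) ∈ seen' → (w, t) ∈ seen ∨
            (v ≤ w ∧ StateOk factors w t ∧
              ∀ x ∈ Aset limit factors w t,
                x ∈ PySem.Set.update results (Aset limit factors v s))) := by
  intro n
  induction n using Nat.strong_induction_on with
  | _ n ih =>
  intro v s hn hv hvU hc0v stack fuel results seen hnd hseenU hinv hfuel
  obtain ⟨f, rfl⟩ : ∃ f, fuel = f + 1 := ⟨fuel - 1, by omega⟩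
  simp only [pyBloop]
  by_cases hseen : (v, s) ∈ seen
  · have hc : PySem.Set.contains seen (v, s) = true := (PySem.Set.contains_iff seen (v, s)).2 hseen
    simp only [hc, if_true]
    have hsub : ∀ x ∈ Aset limit factors v s, x ∈ results := by
      rcases hinv v s hseen with h | h
      · exact absurd h (lt_irrefl v)
      · exact h.2
    exact ⟨f, seen, by rw [set_update_eq_self hsub], by omega, hnd, hseenU,
      fun e he => he, fun w t hw => Or.inl hw⟩
  · have hc : PySem.Set.contains seen (v, s) = false := by
      rw [← Bool.not_eq_true, PySem.Set.contains_iff]; exact hseen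
    simp only [hc, Bool.false_eq_true, if_false]
    rw [push_eq]
    rw [show (PySem.List.pyRange s (PySem.List.len factors) 1).filterMap
        (fun i =>
          if v * PySem.List.pyGetD factors i 0 ≤ limit then
            some (v * PySem.List.pyGetD factors i 0, i)
          else none) = childList limit factors v s from rfl]
    -- facts about the new seen set
    have hadd : PySem.Set.add seen (v, s) = seen ++ [(v, s)] := PySem.Set.add_of_not_mem hseen
    have hnd1 : (PySem.Set.add seen (v, s)).Nodup := PySem.Set.nodup_add _ _ hnd
    have hlen1 : (PySem.Set.add seen (v, s)).length = seen.length + 1 := by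
      rw [hadd]; simp
    have hU1 : ∀ e ∈ PySem.Set.add seen (v, s), e ∈ StUniv limit factors.length c0 s0 := by
      intro e he
      rcases (PySem.Set.mem_add seen (v, s) e).1 he with h | h
      · exact hseenU e h
      · exact h ▸ hvU
    have hcard1 : seen.length + 1 ≤ (StUniv limit factors.length c0 s0).length := by
      rw [← hlen1]
      exact nodup_length_le_card _ _ hnd1 hU1
    -- the children
    set C0 := childList limit factors v s with hC0
    have hC0len : C0.length ≤ factors.length := by
      calc C0.length ≤ (PySem.List.pyRange s (PySem.List.len factors) 1).length :=
            List.length_filterMap_le _ _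
        _ ≤ factors.length := by
            rw [PySem.List.len_eq, PySem.List.length_pyRange_one]
            have hs' : (0 : Int) ≤ s := hv.2.1
            omega
    have hCmem : ∀ pi ∈ C0, ∃ i, i ∈ PySem.List.pyRange s (PySem.List.len factors) 1 ∧
        pi = (v * PySem.List.pyGetD factors i 0, i) ∧
        v * PySem.List.pyGetD factors i 0 ≤ limit := by
      intro pi hpi
      rw [hC0] at hpi
      obtain ⟨i, hi, hmap⟩ := List.mem_filterMap.1 hpi
      by_cases hp : v * PySem.List.pyGetD factors i 0 ≤ limit
      · rw [if_pos hp] at hmap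
        exact ⟨i, hi, by cases hmap; rfl, hp⟩
      · rw [if_neg hp] at hmap
        cases hmap
    -- inner induction: flushing a list of children off the stack
    have inner : ∀ (C : List (Int × Int)), (∀ pi ∈ C, pi ∈ C0) →
        ∀ (stk : List (Int × Int)) (fl : Nat) (rs : PySem.Set Int)
          (sn : PySem.Set (Int × Int)),
          sn.Nodup →
          (∀ e ∈ sn, e ∈ StUniv limit factors.length c0 s0) →
          (∀ w t, (w, t) ∈ sn → w ≤ v ∨
            (StateOk factors w t ∧ ∀ x ∈ Aset limit factors w t, x ∈ rs)) →
          C.length + stk.length +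
              ((StUniv limit factors.length c0 s0).length - sn.length) * (factors.length + 1) ≤ fl →
          ∃ fl' sn',
            pyBloop limit factors fl (C ++ stk) (rs, sn) =
              pyBloop limit factors fl' stk
                (C.foldl (fun r pi => PySem.Set.update r (Aset limit factors pi.1 pi.2)) rs, sn') ∧
            stk.length +
                ((StUniv limit factors.length c0 s0).length - sn'.length) * (factors.length + 1)
              ≤ fl' ∧
            sn'.Nodup ∧
            (∀ e ∈ sn', e ∈ StUniv limit factors.length c0 s0) ∧
            (∀ e ∈ sn, e ∈ sn') ∧
            (∀ w t, (w, t) ∈ sn' → (w, t) ∈ sn ∨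
              (v < w ∧ StateOk factors w t ∧
                ∀ x ∈ Aset limit factors w t,
                  x ∈ C.foldl (fun r pi => PySem.Set.update r (Aset limit factors pi.1 pi.2)) rs)) := by
      intro C
      induction C with
      | nil =>
        intro _ stk fl rs sn hnd' hU' _ hfl
        exact ⟨fl, sn, rfl, by simpa using hfl, hnd', hU', fun e he => he, fun w t hw => Or.inl hw⟩
      | cons pi C ihC =>
        intro hCsub stk fl rs sn hnd' hU' hin hfl
        obtain ⟨i, hiR, hpi, hple⟩ := hCmem pi (hCsub pi (by simp))
        obtain ⟨hok, hlt⟩ := child_ok factors v s i hv hiR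
        have hiI : s ≤ i ∧ i < (factors.length : Int) := by
          have := PySem.List.mem_pyRange_one.1 (by rwa [PySem.List.len_eq] at hiR)
          exact this
        have hpU : (v * PySem.List.pyGetD factors i 0, i) ∈ StUniv limit factors.length c0 s0 :=
          mem_StUniv (by omega) hple (le_trans hv.2.1 hiI.1) hiI.2
        obtain ⟨fl₁, sn₁, heq₁, hpot₁, hnd₁, hU₁, hmono₁, hnew₁⟩ :=
          ih (limit - v * PySem.List.pyGetD factors i 0).toNat (by omega)
            (v * PySem.List.pyGetD factors i 0) i (le_refl _) hok hpU (by omega)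
            (C ++ stk) fl rs sn hnd' hU'
            (fun w t hw => by
              rcases hin w t hw with h | h
              · exact Or.inl (by omega)
              · exact Or.inr h)
            (by simp only [List.length_append, List.length_cons] at hfl ⊢; omega)
        obtain ⟨fl₂, sn₂, heq₂, hpot₂, hnd₂, hU₂, hmono₂, hnew₂⟩ :=
          ihC (fun q hq => hCsub q (by simp [hq])) stk fl₁
            (PySem.Set.update rs (Aset limit factors (v * PySem.List.pyGetD factors i 0) i)) sn₁
            hnd₁ hU₁
            (fun w t hw => by
              rcases hnew₁ w t hw with h | h
              · rcases hin w t h with h' | h'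
                · exact Or.inl h'
                · exact Or.inr ⟨h'.1, fun x hx =>
                    (PySem.Set.mem_update _ _ _).2 (Or.inl (h'.2 x hx))⟩
              · exact Or.inr ⟨h.2.1, h.2.2⟩)
            (by simp only [List.length_append] at hpot₁ ⊢; omega)
        refine ⟨fl₂, sn₂, ?_, hpot₂, hnd₂, hU₂,
          fun e he => hmono₂ e (hmono₁ e he), ?_⟩
        · rw [List.cons_append, hpi, heq₁, heq₂]
          simp only [List.foldl_cons]
        · intro w t hw
          simp only [List.foldl_cons, hpi]
          rcases hnew₂ w t hw with h | h
          · rcases hnew₁ w t h with h' | h'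
            · exact Or.inl h'
            · exact Or.inr ⟨by omega, h'.2.1, fun x hx =>
                foldl_update_mono _ C _ x (h'.2.2 x hx)⟩
          · exact Or.inr h
    -- apply inner to the full child list
    have hmul : ((StUniv limit factors.length c0 s0).length - seen.length) * (factors.length + 1) =
        ((StUniv limit factors.length c0 s0).length - (seen.length + 1)) * (factors.length + 1)
          + (factors.length + 1) := by
      have h1 : (StUniv limit factors.length c0 s0).length - seen.length =
          ((StUniv limit factors.length c0 s0).length - (seen.length + 1)) + 1 := by omega
      rw [h1, Nat.add_mul, one_mul]
    obtain ⟨fl', sn', heq, hpot, hnd', hU', hmono, hnew⟩ :=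
      inner C0 (fun pi hpi => hpi) stack f (PySem.Set.add results v) (PySem.Set.add seen (v, s))
        hnd1 hU1
        (fun w t hw => by
          rcases (PySem.Set.mem_add seen (v, s) (w, t)).1 hw with h | h
          · rcases hinv w t h with h' | h'
            · exact Or.inl (le_of_lt h')
            · exact Or.inr ⟨h'.1, fun x hx => (PySem.Set.mem_add _ _ _).2 (Or.inl (h'.2 x hx))⟩
          · rw [Prod.mk.injEq] at h
            exact Or.inl (le_of_eq h.1))
        (by rw [hlen1]; rw [hmul] at hfuel; omega)
    have hAfold :
        C0.foldl (fun r pi => PySem.Set.update r (Aset limit factors pi.1 pi.2))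
            (PySem.Set.add results v) =
          PySem.Set.update results (Aset limit factors v s) := by
      have hres : PySem.Set.update results PySem.Set.empty = results := PySem.Set.update_nil results
      rw [Aset_unfold limit factors v s hv, update_foldl_comm,
        Abody_foldl_childList, set_update_add, hres]
      rfl
    refine ⟨fl', sn', ?_, ?_, hnd', hU', ?_, ?_⟩
    · rw [heq, hAfold]
    · exact hpot
    · intro e he
      exact hmono e ((PySem.Set.mem_add seen (v, s) e).2 (Or.inl he))
    · intro w t hw
      rcases hnew w t hw with h | h
      · rcases (PySem.Set.mem_add seen (v, s) (w, t)).1 h with h' | h'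
        · exact Or.inl h'
        · rw [Prod.mk.injEq] at h'
          refine Or.inr ⟨le_of_eq h'.1.symm, h'.1 ▸ h'.2 ▸ hv, fun x hx => ?_⟩
          rw [h'.1, h'.2] at hx
          exact (PySem.Set.mem_update _ _ _).2 (Or.inr hx)
      · exact Or.inr ⟨le_of_lt h.1, h.2.1, fun x hx => hAfold ▸ h.2.2 x hx⟩

lemma pyBloop_nil (limit : Int) (factors : List Int) (fl : Nat)
    (st : PySem.Set Int × PySem.Set (Int × Int)) :
    pyBloop limit factors fl [] st = st := by
  cases fl <;> rfl

-- ===== VERDICT (by name: the statement is the Claim_ definition above) =====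
theorem products_up_to_spec : Claim_equal_products_up_to := by
  intro limit factors current start _hdom hpre
  unfold Spec_products_up_to
  obtain ⟨hs0, hcs, hsuf⟩ := hpre
  by_cases hbig : (factors.length : Int) ≤ start
  · -- empty loop: both programs return {current}
    have hnil : PySem.List.pyRange start (PySem.List.len factors) 1 = [] := by
      rw [List.eq_nil_iff_forall_not_mem]
      intro x hx
      have := PySem.List.mem_pyRange_one.1 hx
      rw [PySem.List.len_eq] at this
      omega
    have hc : PySem.Set.contains (PySem.Set.empty (α := Int × Int)) (current, start) = false := by
      rw [← Bool.not_eq_true, PySem.Set.contains_iff]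
      simp [PySem.Set.empty]
    simp only [products_up_to, products_up_to_alt, pyAgo, pyBloop, hnil, List.foldl_nil,
      List.reverse_nil, hc, Bool.false_eq_true, if_false]
  · have hcur : 1 ≤ current := hcs.resolve_right hbig
    have hok : StateOk factors current start := ⟨hcur, hs0, hsuf⟩
    set U := StUniv limit factors.length current start with hU
    set F := ((limit - current).toNat + 1) * (factors.length + 1) * (factors.length + 1)
        + factors.length + 2 with hF
    have hUcard : U.length = 1 + (limit + 1 - current).toNat * factors.length := by
      rw [hU, length_StUniv]
    have hFbig : 0 + 1 + (U.length - 0) * (factors.length + 1) ≤ F := by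
      rw [Nat.sub_zero]
      have h2 : (limit + 1 - current).toNat ≤ (limit - current).toNat + 1 := by omega
      have h3 : (limit + 1 - current).toNat * factors.length * (factors.length + 1) ≤
          ((limit - current).toNat + 1) * (factors.length + 1) * (factors.length + 1) := by
        apply Nat.mul_le_mul_right
        exact Nat.mul_le_mul h2 (Nat.le_succ _)
      have h1 : U.length * (factors.length + 1) =
          (factors.length + 1)
            + (limit + 1 - current).toNat * factors.length * (factors.length + 1) := by
        rw [hUcard]; ring
      rw [hF]
      omega
    obtain ⟨fuel', seen', heq, -, -, -, -, -⟩ :=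
      stack_sim limit factors current start ((limit - current).toNat) current start
        (le_refl _) hok (List.mem_cons_self) (le_refl _)
        [] F PySem.Set.empty PySem.Set.empty
        (by simp [PySem.Set.empty]) (by simp [PySem.Set.empty])
        (by simp [PySem.Set.empty]) (by simpa using hFbig)
    show pyAgo limit factors ((limit - current).toNat + 1) current start = _
    rw [show products_up_to_alt limit factors current start =
        (pyBloop limit factors F [(current, start)] (PySem.Set.empty, PySem.Set.empty)).1 from rfl,
      heq, pyBloop_nil]
    have h1 : PySem.Set.update (PySem.Set.empty (α := Int)) (Aset limit factors current start) =
        PySem.Set.ofList (Aset limit factors current start) := rfl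
    show Aset limit factors current start = _
    rw [h1]
    exact (PySem.Set.ofList_eq_self_of_nodup _
      (A_nodup limit factors ((limit - current).toNat + 1) current start)).symm
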